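-- pv_equiv track=rewrite | github.com/kishorsan/Pentagon_pro | strings/angram.py | filter_func
-- ===== SOURCE A (Python) =====
-- def filter_func(s):
--     nstr = ''
--     for i in s:
--         if 'A' <= i <= 'Z':
--             nstr += i
--         elif 'a' <= i <= 'z':
--             nstr += chr(ord(i)-32)
--     return nstr
-- ===== SOURCE B (Python) =====
-- import re
--
-- def filter_func(s):
--     return re.sub('[^A-Za-z]', '', s).upper()
-- ===== Notes on version B (the rewrite author's own statement) =====
-- stated objective: faster
-- what changed: Replaces the per-character Python loop with repeated string concatenation by one C-level regex pass that strips non-letters followed by a single bulk .upper() on the filtered string.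
import Mathlib
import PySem

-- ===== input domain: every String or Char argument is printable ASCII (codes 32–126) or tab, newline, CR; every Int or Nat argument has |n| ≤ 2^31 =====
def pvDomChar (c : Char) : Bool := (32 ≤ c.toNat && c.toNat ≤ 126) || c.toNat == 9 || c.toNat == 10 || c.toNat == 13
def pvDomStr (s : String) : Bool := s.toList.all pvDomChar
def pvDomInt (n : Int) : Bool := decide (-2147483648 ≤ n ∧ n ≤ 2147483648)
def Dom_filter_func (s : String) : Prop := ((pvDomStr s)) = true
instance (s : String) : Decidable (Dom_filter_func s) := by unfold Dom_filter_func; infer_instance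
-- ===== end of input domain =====

-- B replaces A's per-character loop with one regex filter pass plus a single bulk .upper() (idiomatic).

-- ===== PORT A =====
def filter_func (s : String) : String :=
  String.ofList (s.toList.foldl (fun nstr i =>
    if 'A' ≤ i ∧ i ≤ 'Z' then nstr ++ [i]
    else if 'a' ≤ i ∧ i ≤ 'z' then nstr ++ [Char.ofNat (i.toNat - 32)]
    else nstr) [])

-- ===== PORT B =====
-- re.sub('[^A-Za-z]', '', s) keeps exactly the ASCII letters: ported as a filter by
-- PySem.Chars.isalpha (exact on the ASCII domain); .upper() is PySem.Str.upper.
def filter_func_alt (s : String) : String :=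
  PySem.Str.upper (String.ofList (s.toList.filter PySem.Chars.isalpha))

-- ===== PRECONDITION & SPEC =====
def Spec_filter_func (s : String) (out : String) : Prop := out = filter_func_alt s
instance (s : String) (out : String) : Decidable (Spec_filter_func s out) := by unfold Spec_filter_func; infer_instance

-- ===== CLAIM (what is proved, stated in full; the proofs are below) =====
def Claim_equal_filter_func : Prop := ∀ (s : String), Dom_filter_func s → Spec_filter_func s (filter_func s)

-- ===== LEMMAS AND PROOFS =====

-- one step of A's loop appends exactly the uppercased letter B keeps (or nothing)
theorem filter_func_step (c : Char) (acc : List Char) :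
    (if 'A' ≤ c ∧ c ≤ 'Z' then acc ++ [c]
     else if 'a' ≤ c ∧ c ≤ 'z' then acc ++ [Char.ofNat (c.toNat - 32)]
     else acc)
    = acc ++ (if PySem.Chars.isalpha c then [PySem.Chars.upperChar c] else []) := by
  by_cases hU : 'A' ≤ c ∧ c ≤ 'Z'
  · have hnl : ¬ ('a' ≤ c) := fun h => absurd (le_trans h hU.2) (by decide)
    simp [hU, PySem.Chars.isalpha, PySem.Chars.isupper, PySem.Chars.islower,
      PySem.Chars.upperChar, hnl]
  · by_cases hL : 'a' ≤ c ∧ c ≤ 'z'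
    · simp [hU, hL, PySem.Chars.isalpha, PySem.Chars.isupper, PySem.Chars.islower,
        PySem.Chars.upperChar]
    · have h1 : ¬ ('A' ≤ c) ∨ ¬ (c ≤ 'Z') := not_and_or.mp hU
      have h2 : ¬ ('a' ≤ c) ∨ ¬ (c ≤ 'z') := not_and_or.mp hL
      rcases h1 with h1 | h1 <;> rcases h2 with h2 | h2 <;>
        simp [PySem.Chars.isalpha, PySem.Chars.isupper, PySem.Chars.islower, h1, h2]

theorem filter_func_loop (l : List Char) (acc : List Char) :
    (l.foldl (fun nstr i =>
      if 'A' ≤ i ∧ i ≤ 'Z' then nstr ++ [i]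
      else if 'a' ≤ i ∧ i ≤ 'z' then nstr ++ [Char.ofNat (i.toNat - 32)]
      else nstr) acc)
    = acc ++ PySem.Chars.upper (l.filter PySem.Chars.isalpha) := by
  induction l generalizing acc with
  | nil => simp [PySem.Chars.upper]
  | cons c t ih =>
    simp only [List.foldl_cons]
    rw [filter_func_step]
    rw [ih]
    by_cases h : PySem.Chars.isalpha c <;>
      simp [h, PySem.Chars.upper]

-- ===== VERDICT (by name: the statement is the Claim_ definition above) =====
theorem filter_func_spec : Claim_equal_filter_func := by
  intro s _
  unfold Spec_filter_func filter_func filter_func_alt PySem.Str.upper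
  rw [filter_func_loop]
  simp
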